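-- pv_equiv track=rewrite | github.com/PyThaiNLP/han-coref | predatanew.py | get_data_tag
-- ===== SOURCE A (Python) =====
-- def get_data_tag(listd):
-- 	list_all=[]
-- 	c=[]
-- 	for i in listd:
-- 		if i !='':
-- 			c.append((i.split("\t")[0],i.split("\t")[1],i.split("\t")[2]))
-- 		else:
-- 			list_all.append(c)
-- 			c=[]
-- 	return list_all
-- ===== SOURCE B (Python) =====
-- def get_data_tag(listd):
--     # two-phase: split every row into its triple first, then cut the cell list at the
--     # None delimiters (one chunk per delimiter, trailing segment discarded)
--     cells = [None if x == '' else (x.split('\t')[0], x.split('\t')[1], x.split('\t')[2]) for x in listd]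
--     idxs = [n for n, c in enumerate(cells) if c is None]
--     out = []
--     prev = 0
--     for idx in idxs:
--         out.append(cells[prev:idx])
--         prev = idx + 1
--     return out
-- ===== Notes on version B (the rewrite author's own statement) =====
-- stated objective: alternative
-- what changed: Replaces A's single pass with a running chunk buffer by a two-phase decomposition: first map every row to its split triple (None for an empty row), then collect the None positions and slice the cell list between consecutive delimiters to build the chunks.
import Mathlib
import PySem

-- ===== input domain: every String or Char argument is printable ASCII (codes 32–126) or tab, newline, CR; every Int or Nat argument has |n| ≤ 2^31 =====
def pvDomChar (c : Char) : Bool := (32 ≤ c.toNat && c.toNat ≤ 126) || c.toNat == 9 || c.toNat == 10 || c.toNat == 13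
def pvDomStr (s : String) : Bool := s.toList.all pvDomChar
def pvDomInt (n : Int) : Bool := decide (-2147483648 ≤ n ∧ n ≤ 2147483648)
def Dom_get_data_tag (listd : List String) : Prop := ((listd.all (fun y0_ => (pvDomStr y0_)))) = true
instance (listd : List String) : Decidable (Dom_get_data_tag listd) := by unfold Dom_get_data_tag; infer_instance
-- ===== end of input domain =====

-- B replaces A's running-buffer single pass by a two-phase decomposition: split every row
-- into its triple first, then cut the resulting cell list at the delimiter positions.
-- Objective: alternative (same cost, different structure).

-- ===== PORT A =====
-- r.split("\t"): the separator is non-empty, so PySem.Str.split? never returns none; exact.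
def pvSplitTab (s : String) : List String := (PySem.Str.split? s "\t").getD []

def get_data_tag (listd : List String) : List (List (String × String × String)) :=
  (listd.foldl
    (fun (st : List (List (String × String × String)) × List (String × String × String)) i =>
      if i ≠ "" then
        (st.1, st.2 ++ [(PySem.List.pyGetD (pvSplitTab i) 0 "",
                         PySem.List.pyGetD (pvSplitTab i) 1 "",
                         PySem.List.pyGetD (pvSplitTab i) 2 "")])
      else
        (st.1 ++ [st.2], []))
    ([], [])).1

-- ===== PORT B =====
def get_data_tag_alt (listd : List String) : List (List (String × String × String)) :=
  let cells : List (Option (String × String × String)) :=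
    listd.map (fun x =>
      if x = "" then none
      else some (PySem.List.pyGetD (pvSplitTab x) 0 "",
                 PySem.List.pyGetD (pvSplitTab x) 1 "",
                 PySem.List.pyGetD (pvSplitTab x) 2 ""))
  let idxs := ((PySem.List.enumerate cells 0).filter (fun p => p.2 == none)).map Prod.fst
  (idxs.foldl
    (fun (st : List (List (String × String × String)) × Int) idx =>
      -- cells[prev:idx] holds only non-None cells in Python; reduceOption unwraps them (exact)
      (st.1 ++ [(PySem.List.slice cells (some st.2) (some idx)).reduceOption], idx + 1))
    ([], 0)).1

-- ===== PRECONDITION & SPEC =====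
-- Pre_ excludes exactly the inputs where Python A raises IndexError: a non-empty row with
-- fewer than three tab-separated fields (B raises there as well).
def Pre_get_data_tag (listd : List String) : Prop :=
  ∀ i ∈ listd, i ≠ "" → 3 ≤ (pvSplitTab i).length
instance (listd : List String) : Decidable (Pre_get_data_tag listd) := by
  unfold Pre_get_data_tag; infer_instance
def pvWitness_get_data_tag : List String := ["a\tb\tc", "", "", "x\ty\tz\tw", ""]

def Spec_get_data_tag (listd : List String) (out : List (List (String × String × String))) : Prop :=
  out = get_data_tag_alt listd
instance (listd : List String) (out : List (List (String × String × String))) :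
    Decidable (Spec_get_data_tag listd out) := by unfold Spec_get_data_tag; infer_instance

-- ===== CLAIM (what is proved, stated in full; the proofs are below) =====
def Claim_equal_get_data_tag : Prop :=
  ∀ (listd : List String), Dom_get_data_tag listd → Pre_get_data_tag listd →
    Spec_get_data_tag listd (get_data_tag listd)

-- ===== LEMMAS AND PROOFS =====

-- the triple a non-empty row contributes
def pvTriple (r : String) : String × String × String :=
  (PySem.List.pyGetD (pvSplitTab r) 0 "",
   PySem.List.pyGetD (pvSplitTab r) 1 "",
   PySem.List.pyGetD (pvSplitTab r) 2 "")

-- B's per-row cell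
def pvCell (x : String) : Option (String × String × String) :=
  if x = "" then none else some (pvTriple x)

-- reference chunking over the rows, with the running buffer made explicit
def pvChunks : List String → List (String × String × String) → List (List (String × String × String))
  | [], _ => []
  | x :: xs, c => if x = "" then c :: pvChunks xs [] else pvChunks xs (c ++ [pvTriple x])

-- reference chunking over the cell list
def pvChunksO : List (Option (String × String × String)) → List (String × String × String) →
    List (List (String × String × String))
  | [], _ => []
  | none :: xs, c => c :: pvChunksO xs []
  | some t :: xs, c => pvChunksO xs (c ++ [t])

-- delimiter (None-cell) positions starting from s
def pvIdxs : List (Option (String × String × String)) → Int → List Int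
  | [], _ => []
  | none :: xs, s => s :: pvIdxs xs (s + 1)
  | some _ :: xs, s => pvIdxs xs (s + 1)

lemma pvFoldA (l : List String) :
    ∀ acc c,
      (l.foldl
        (fun (st : List (List (String × String × String)) × List (String × String × String)) i =>
          if i ≠ "" then (st.1, st.2 ++ [pvTriple i]) else (st.1 ++ [st.2], []))
        (acc, c)).1 = acc ++ pvChunks l c := by
  induction l with
  | nil => intro acc c; simp [pvChunks]
  | cons x xs ih =>
    intro acc c
    rw [List.foldl_cons]
    by_cases hx : x = ""
    · rw [if_neg (by simp [hx]), ih]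
      simp [pvChunks, hx]
    · rw [if_pos hx, ih]
      simp [pvChunks, hx]

lemma pvChunksMap (l : List String) :
    ∀ c, pvChunksO (l.map pvCell) c = pvChunks l c := by
  induction l with
  | nil => intro c; simp [pvChunks, pvChunksO]
  | cons x xs ih =>
    intro c
    by_cases hx : x = ""
    · simp [pvCell, hx, pvChunks, pvChunksO, ih]
    · simp [pvCell, hx, pvChunks, pvChunksO, ih]

lemma pvIdxsEnum (l : List (Option (String × String × String))) :
    ∀ s : Int, ((PySem.List.enumerate l s).filter (fun p => p.2.isNone)).map Prod.fst = pvIdxs l s := by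
  induction l with
  | nil => intro s; simp [PySem.List.enumerate_nil, pvIdxs]
  | cons x xs ih =>
    intro s
    cases x with
    | none => simp [PySem.List.enumerate_cons, pvIdxs, ih]
    | some t => simp [PySem.List.enumerate_cons, pvIdxs, ih]

lemma pvFoldB (L : List (Option (String × String × String))) (l : List (Option (String × String × String))) :
    ∀ (k p : Nat) (out : List (List (String × String × String))),
      L.drop k = l → p ≤ k →
      ((pvIdxs l (k : Int)).foldl
        (fun (st : List (List (String × String × String)) × Int) idx =>
          (st.1 ++ [(PySem.List.slice L (some st.2) (some idx)).reduceOption], idx + 1))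
        (out, (p : Int))).1
        = out ++ pvChunksO l (((L.drop p).take (k - p)).reduceOption) := by
  induction l with
  | nil => intro k p out _ _; simp [pvIdxs, pvChunksO]
  | cons x xs ih =>
    intro k p out hk hp
    have hk1 : L.drop (k + 1) = xs := by
      have h1 := congrArg (List.drop 1) hk
      simpa [List.drop_drop, Nat.add_comm] using h1
    have hklen : k < L.length := by
      by_contra h
      rw [List.drop_eq_nil_of_le (by omega)] at hk
      exact List.cons_ne_nil x xs hk.symm
    have hxk : L[k]? = some x := by
      have h0 : (L.drop k)[0]? = some x := by rw [hk]; rfl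
      rw [List.getElem?_drop] at h0
      simpa using h0
    have hcast : ((k : Int) + 1) = ((k + 1 : Nat) : Int) := by push_cast; ring
    cases x with
    | none =>
      rw [show pvIdxs (none :: xs) (k : Int) = (k : Int) :: pvIdxs xs ((k : Int) + 1) from rfl]
      rw [List.foldl_cons, hcast, ih (k + 1) (k + 1) _ hk1 le_rfl]
      rw [PySem.List.slice_natCast]
      simp [pvChunksO]
    | some t =>
      rw [show pvIdxs (some t :: xs) (k : Int) = pvIdxs xs ((k : Int) + 1) from rfl]
      rw [hcast, ih (k + 1) p out hk1 (by omega)]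
      have htake : (L.drop p).take (k + 1 - p) = (L.drop p).take (k - p) ++ [some t] := by
        rw [show k + 1 - p = (k - p) + 1 from by omega, List.take_add_one]
        rw [List.getElem?_drop, show p + (k - p) = k from by omega, hxk]
        rfl
      rw [htake]
      simp [pvChunksO, List.reduceOption_append]

-- ===== VERDICT (by name: the statement is the Claim_ definition above) =====
theorem get_data_tag_spec : Claim_equal_get_data_tag := by
  intro listd _ _
  unfold Spec_get_data_tag
  have hA : get_data_tag listd = pvChunks listd [] := by
    have h := pvFoldA listd [] []
    simpa [get_data_tag, pvTriple] using h
  have hB : get_data_tag_alt listd = pvChunks listd [] := by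
    have h := pvFoldB (listd.map pvCell) (listd.map pvCell) 0 0 [] rfl le_rfl
    simp only [Nat.cast_zero, List.drop_zero, Nat.sub_zero, List.take_zero,
      List.reduceOption_nil, List.nil_append] at h
    rw [pvChunksMap] at h
    simpa [get_data_tag_alt, pvIdxsEnum, pvCell, pvTriple] using h
  rw [hA, hB]
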